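-- pv_equiv track=rewrite | github.com/D9-cell/deep_research_agent | core/agent_service.py | _parse_similar_problems
-- ===== SOURCE A (Python) =====
-- def _parse_similar_problems(text: str) -> list[str]:
--     """
--     Split a Similar Problems block into individual problem entries.
--
--     Each entry starts with a ``Platform:`` line and contains four fields:
--     Platform, Title, URL, Why similar.  Any preamble before the first
--     ``Platform:`` line (e.g. the section heading) is discarded.
--
--     Args:
--         text: Raw similar-problems section content.
--
--     Returns:
--         List of formatted entry strings; empty list if none found.
--     """
--     entries: list[str] = []
--     current: list[str] = []
--     inside_entry = False  # ignore preamble before the first Platform: line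
--
--     for line in text.splitlines():
--         stripped = line.strip()
--         if stripped.lower().startswith("platform:"):
--             if inside_entry and current:
--                 # Flush the previous entry
--                 entry = "\n".join(ln for ln in current if ln.strip())
--                 if entry:
--                     entries.append(entry)
--             current = [stripped]
--             inside_entry = True
--         elif inside_entry and stripped:
--             current.append(stripped)
--
--     if inside_entry and current:
--         entry = "\n".join(ln for ln in current if ln.strip())
--         if entry:
--             entries.append(entry)
--
--     return entries
-- ===== SOURCE B (Python) =====
-- def _parse_similar_problems(text: str) -> list[str]:
--     def is_start(s: str) -> bool:
--         return s.lower().startswith("platform:")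
--
--     # one pass to clean: stripped, non-empty lines
--     lines = [s for s in (l.strip() for l in text.splitlines()) if s]
--     entries: list[str] = []
--     i = 0
--     # skip preamble before the first Platform: line
--     while i < len(lines) and not is_start(lines[i]):
--         i += 1
--     # slice the list at each Platform: marker
--     while i < len(lines):
--         j = i + 1
--         while j < len(lines) and not is_start(lines[j]):
--             j += 1
--         entries.append("\n".join(lines[i:j]))
--         i = j
--     return entries
-- ===== Notes on version B (the rewrite author's own statement) =====
-- stated objective: alternative
-- what changed: Replaced A's single stateful pass (inside_entry flag, growing current buffer, flush-on-marker with a re-strip-and-filter at each flush) by a pipeline: strip and drop blank lines once, skip the preamble, then repeatedly cut the cleaned list at the next Platform: marker and join each slice.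
import Mathlib
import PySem

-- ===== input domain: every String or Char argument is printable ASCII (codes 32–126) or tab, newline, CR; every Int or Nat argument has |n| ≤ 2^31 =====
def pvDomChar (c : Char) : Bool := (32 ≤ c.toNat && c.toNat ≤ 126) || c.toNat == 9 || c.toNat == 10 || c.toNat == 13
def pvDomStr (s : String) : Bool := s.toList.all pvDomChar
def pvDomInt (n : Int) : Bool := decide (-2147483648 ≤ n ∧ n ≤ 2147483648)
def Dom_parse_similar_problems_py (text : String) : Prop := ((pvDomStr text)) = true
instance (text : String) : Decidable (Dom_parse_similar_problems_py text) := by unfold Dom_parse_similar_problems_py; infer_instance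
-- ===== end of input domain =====

-- B is an alternative decomposition of the same task (clean/filter the lines once, then cut the list
-- at the Platform: markers) replacing A's stateful accumulator loop; same cost, no speed claim.

-- ===== PORT A =====
def pvIsStartA (s : String) : Bool := PySem.Str.startswith (PySem.Str.lower s) "platform:"

-- flush of the current entry: Python has this block twice (inside the loop and after it)
def pvFlushA (entries current : List String) (inside : Bool) : List String :=
  if inside = true ∧ current ≠ [] then
    let entry := PySem.Str.join "\n" (current.filter (fun ln => PySem.Str.strip ln ≠ ""))
    if entry ≠ "" then entries ++ [entry] else entries
  else entries

def pvStepA (st : List String × List String × Bool) (line : String) :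
    List String × List String × Bool :=
  let stripped := PySem.Str.strip line
  if pvIsStartA stripped = true then
    (pvFlushA st.1 st.2.1 st.2.2, [stripped], true)
  else if st.2.2 = true ∧ stripped ≠ "" then
    (st.1, st.2.1 ++ [stripped], st.2.2)
  else st

def parse_similar_problems_py (text : String) : List String :=
  let st := (PySem.Str.splitlines text).foldl pvStepA ([], [], false)
  pvFlushA st.1 st.2.1 st.2.2

-- ===== PORT B =====
def pvIsStartB (s : String) : Bool := PySem.Str.startswith (PySem.Str.lower s) "platform:"

-- the inner while loop: cut one entry off at the next Platform: marker, recurse on the rest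
def pvSplitEntriesB : List String → List String
  | [] => []
  | h :: t =>
    PySem.Str.join "\n" (h :: t.takeWhile (fun s => !pvIsStartB s))
      :: pvSplitEntriesB (t.dropWhile (fun s => !pvIsStartB s))
termination_by l => l.length
decreasing_by
  simpa using Nat.lt_succ_of_le (List.length_dropWhile_le _ _)

def parse_similar_problems_py_alt (text : String) : List String :=
  let lines := ((PySem.Str.splitlines text).map PySem.Str.strip).filter (fun s => s ≠ "")
  pvSplitEntriesB (lines.dropWhile (fun s => !pvIsStartB s))

-- ===== PRECONDITION & SPEC =====
def Spec_parse_similar_problems_py (text : String) (out : List String) : Prop := out = parse_similar_problems_py_alt text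
instance (text : String) (out : List String) : Decidable (Spec_parse_similar_problems_py text out) := by unfold Spec_parse_similar_problems_py; infer_instance

-- ===== CLAIM (what is proved, stated in full; the proofs are below) =====
def Claim_equal_parse_similar_problems_py : Prop := ∀ (text : String), Dom_parse_similar_problems_py text → Spec_parse_similar_problems_py text (parse_similar_problems_py text)

-- ===== LEMMAS AND PROOFS =====

-- middle spec: the grouping both ports compute, as one recursion over the stripped lines
def pvG : List String → List String → List String
  | cur, [] => [PySem.Str.join "\n" cur]
  | cur, s :: t =>
    if pvIsStartB s then PySem.Str.join "\n" cur :: pvG [s] t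
    else if s ≠ "" then pvG (cur ++ [s]) t
    else pvG cur t

def pvH : List String → List String
  | [] => []
  | s :: t => if pvIsStartB s then pvG [s] t else pvH t

theorem pv_isStartA_empty : pvIsStartA "" = false := by decide

theorem pv_isStartB_empty : pvIsStartB "" = false := by decide

theorem pv_startAB (s : String) : pvIsStartA s = pvIsStartB s := rfl

theorem pv_head_dw {α : Type} (p : α → Bool) (l : List α) (x : α)
    (h : (l.dropWhile p).head? = some x) : p x = false := by
  induction l with
  | nil => simp at h
  | cons a t ih =>
    by_cases hp : p a
    · simp [hp] at h; exact ih h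
    · simp [hp] at h; subst h; simpa using hp

theorem pv_strip_nil_iff (cs : List Char) :
    PySem.Chars.strip cs = [] ↔ ∀ c ∈ cs, PySem.Chars.isspace c = true := by
  unfold PySem.Chars.strip PySem.Chars.rstrip PySem.Chars.lstrip
  rw [List.reverse_eq_nil_iff, List.dropWhile_eq_nil_iff]
  constructor
  · intro h c hc
    rw [← List.takeWhile_append_dropWhile (p := PySem.Chars.isspace) (l := cs),
      List.mem_append] at hc
    rcases hc with h1 | h2
    · exact List.mem_takeWhile_imp h1
    · exact h c (by simpa using h2)
  · intro h c hc
    exact h c ((List.dropWhile_sublist _).subset (by simpa using hc))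

theorem pv_chars_strip_strip (cs : List Char) (h : PySem.Chars.strip cs ≠ []) :
    PySem.Chars.strip (PySem.Chars.strip cs) ≠ [] := by
  intro hss
  rw [pv_strip_nil_iff] at hss
  have h2 : (PySem.Chars.strip cs).getLast? =
      (List.dropWhile PySem.Chars.isspace
        (List.dropWhile PySem.Chars.isspace cs).reverse).head? := by
    show ((List.dropWhile PySem.Chars.isspace
      (List.dropWhile PySem.Chars.isspace cs).reverse).reverse).getLast? = _
    rw [List.getLast?_reverse]
  obtain ⟨x, hx⟩ := Option.isSome_iff_exists.mp (List.getLast?_isSome.mpr h)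
  have hxf : PySem.Chars.isspace x = false := pv_head_dw _ _ _ (h2 ▸ hx)
  exact absurd (hss x (List.mem_of_getLast? hx)) (by simp [hxf])

theorem pv_strip_strip_ne (x : String) (h : PySem.Str.strip x ≠ "") :
    PySem.Str.strip (PySem.Str.strip x) ≠ "" := by
  rw [Ne, ← String.toList_eq_nil_iff] at h ⊢
  simpa [PySem.Str.toList_strip] using
    pv_chars_strip_strip x.toList (by simpa [PySem.Str.toList_strip] using h)

theorem pv_isStart_ne_empty (s : String) (h : pvIsStartB s = true) : s ≠ "" := by
  intro hs; subst hs; exact absurd h (by decide)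

theorem pv_join_ne (c : String) (cs : List String) (hc : c ≠ "") :
    PySem.Str.join "\n" (c :: cs) ≠ "" := by
  rw [Ne, ← String.toList_eq_nil_iff] at hc ⊢
  cases cs with
  | nil => simpa [PySem.Str.toList_join, PySem.Chars.join_singleton] using hc
  | cons d r => simp [PySem.Str.toList_join, PySem.Chars.join_cons_cons]

theorem pv_filter_id (cur : List String) (h : ∀ x ∈ cur, PySem.Str.strip x ≠ "") :
    cur.filter (fun ln => PySem.Str.strip ln ≠ "") = cur := by
  rw [List.filter_eq_self]
  intro a ha
  simpa using h a ha

theorem pv_ne_empty_of_strip (x : String) (h : PySem.Str.strip x ≠ "") : x ≠ "" := by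
  intro hx; subst hx; exact h rfl

theorem pv_flush_inv (entries cur : List String) (hne : cur ≠ [])
    (h : ∀ x ∈ cur, PySem.Str.strip x ≠ "") :
    pvFlushA entries cur true = entries ++ [PySem.Str.join "\n" cur] := by
  unfold pvFlushA
  rw [if_pos ⟨rfl, hne⟩]
  simp only [pv_filter_id cur h]
  obtain ⟨c, cs, rfl⟩ : ∃ c cs, cur = c :: cs := by
    cases cur with
    | nil => exact absurd rfl hne
    | cons c cs => exact ⟨c, cs, rfl⟩
  rw [if_pos (pv_join_ne c cs (pv_ne_empty_of_strip c (h c List.mem_cons_self)))]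

theorem pv_A1 (rs : List String) : ∀ entries cur, cur ≠ [] →
    (∀ x ∈ cur, PySem.Str.strip x ≠ "") →
    (let st := rs.foldl pvStepA (entries, cur, true)
     pvFlushA st.1 st.2.1 st.2.2) = entries ++ pvG cur (rs.map PySem.Str.strip) := by
  induction rs with
  | nil =>
    intro entries cur hne h
    simpa [pvG] using pv_flush_inv entries cur hne h
  | cons r rs ih =>
    intro entries cur hne h
    simp only [List.foldl_cons, List.map_cons]
    by_cases hst : pvIsStartA (PySem.Str.strip r) = true
    · have hs : PySem.Str.strip (PySem.Str.strip r) ≠ "" :=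
        pv_strip_strip_ne r (pv_isStart_ne_empty _ (pv_startAB _ ▸ hst))
      have hstep : pvStepA (entries, cur, true) r =
          (entries ++ [PySem.Str.join "\n" cur], [PySem.Str.strip r], true) := by
        simp only [pvStepA, if_pos hst]
        rw [pv_flush_inv entries cur hne h]
      rw [hstep, ih _ _ (by simp) (by simpa using hs)]
      simp [pvG, ← pv_startAB, hst]
    · by_cases hne' : PySem.Str.strip r ≠ ""
      · have hstep : pvStepA (entries, cur, true) r =
            (entries, cur ++ [PySem.Str.strip r], true) := by
          simp [pvStepA, hst, hne']
        rw [hstep, ih _ _ (by simp [hne]) ?_]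
        · simp [pvG, ← pv_startAB, hst, hne']
        · intro x hx
          rcases List.mem_append.mp hx with h1 | h2
          · exact h x h1
          · simp only [List.mem_singleton] at h2
            subst h2
            exact pv_strip_strip_ne r hne'
      · have hstep : pvStepA (entries, cur, true) r = (entries, cur, true) := by
          simp [pvStepA, hst, hne']
        rw [hstep, ih _ _ hne h]
        simp only [not_not] at hne'
        simp [pvG, ← pv_startAB, hne', pv_isStartA_empty]

theorem pv_A0 (rs : List String) :
    (let st := rs.foldl pvStepA ([], [], false)
     pvFlushA st.1 st.2.1 st.2.2) = pvH (rs.map PySem.Str.strip) := by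
  induction rs with
  | nil => simp [pvFlushA, pvH]
  | cons r rs ih =>
    simp only [List.foldl_cons, List.map_cons]
    by_cases hst : pvIsStartA (PySem.Str.strip r) = true
    · have hstep : pvStepA (([], [], false) : List String × List String × Bool) r =
          ([], [PySem.Str.strip r], true) := by
        simp [pvStepA, hst, pvFlushA]
      have hs : PySem.Str.strip (PySem.Str.strip r) ≠ "" :=
        pv_strip_strip_ne r (pv_isStart_ne_empty _ (pv_startAB _ ▸ hst))
      rw [hstep, pv_A1 rs [] [PySem.Str.strip r] (by simp) (by simpa using hs)]
      simp [pvH, ← pv_startAB, hst]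
    · have hstep : pvStepA (([], [], false) : List String × List String × Bool) r =
          ([], [], false) := by
        simp [pvStepA, hst]
      rw [hstep, ih]
      simp [pvH, ← pv_startAB, hst]

theorem pv_GB (ss : List String) : ∀ cur, pvG cur ss =
    PySem.Str.join "\n" (cur ++ (ss.filter (fun s => s ≠ "")).takeWhile (fun s => !pvIsStartB s))
      :: pvSplitEntriesB ((ss.filter (fun s => s ≠ "")).dropWhile (fun s => !pvIsStartB s)) := by
  induction ss with
  | nil => intro cur; simp [pvG, pvSplitEntriesB]
  | cons s t ih =>
    intro cur
    by_cases hst : pvIsStartB s = true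
    · have hne : s ≠ "" := pv_isStart_ne_empty s hst
      simp only [pvG, if_pos hst, List.filter_cons, ih [s]]
      simp [pvSplitEntriesB, hst, hne]
    · by_cases hne : s ≠ ""
      · simp only [pvG, hst, ih (cur ++ [s])]
        simp [hne, hst]
      · simp only [not_not] at hne
        simp [pvG, hne, ih cur, pv_isStartB_empty]

theorem pv_HB (ss : List String) : pvH ss =
    pvSplitEntriesB ((ss.filter (fun s => s ≠ "")).dropWhile (fun s => !pvIsStartB s)) := by
  induction ss with
  | nil => simp [pvH, pvSplitEntriesB]
  | cons s t ih =>
    by_cases hst : pvIsStartB s = true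
    · have hne : s ≠ "" := pv_isStart_ne_empty s hst
      simp only [pvH, if_pos hst, pv_GB t [s]]
      simp [hne, hst, pvSplitEntriesB]
    · by_cases hne : s ≠ ""
      · simp only [pvH, hst, ih]
        simp [hne, hst]
      · simp only [not_not] at hne
        simp [pvH, hne, ih, pv_isStartB_empty]

-- ===== VERDICT (by name: the statement is the Claim_ definition above) =====
theorem parse_similar_problems_py_spec : Claim_equal_parse_similar_problems_py := by
  intro text _
  unfold Spec_parse_similar_problems_py parse_similar_problems_py parse_similar_problems_py_alt
  rw [pv_A0, pv_HB]
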